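-- pv_equiv track=rewrite | github.com/SSC-ICT-Innovatie/LearningLion-WOO | src/preprocess_make_subset_ministry.py | make_unique_tuple
-- ===== SOURCE A (Python) =====
-- def make_unique_tuple(tuple_list):
--     # Dictionary to store ID as key and a tuple of (publisher, count) as value
--     count_dict = {}
--
--     # Iterate over each tuple in the input list
--     for id, publisher in tuple_list:
--         if id in count_dict:
--             # Increase the count for this ID
--             current_publisher, current_count = count_dict[id]
--             count_dict[id] = (current_publisher, current_count + 1)
--         else:
--             # Add new ID with the publisher and initial count of 1
--             count_dict[id] = (publisher, 1)
--
--     # Generate the list of unique tuples with counts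
--     return [(id, publisher, count) for id, (publisher, count) in count_dict.items()]
-- ===== SOURCE B (Python) =====
-- def make_unique_tuple(tuple_list):
--     # Dict-free peel algorithm: repeatedly take the first remaining id,
--     # count all its occurrences and remove them in one scan, emitting one
--     # row per round; rounds occur in first-appearance order by construction.
--     result = []
--     rest = list(tuple_list)
--     while rest:
--         id, publisher = rest[0]
--         n = 0
--         remaining = []
--         for x, p in rest:
--             if x == id:
--                 n += 1
--             else:
--                 remaining.append((x, p))
--         result.append((id, publisher, n))
--         rest = remaining
--     return result
-- ===== Notes on version B (the rewrite author's own statement) =====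
-- stated objective: alternative
-- what changed: Replaces A's dictionary accumulation (one pass maintaining id -> (publisher, count)) by a dict-free peel loop: repeatedly take the first remaining id, count and delete all its occurrences in one scan, and emit one output row per round.
import Mathlib
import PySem

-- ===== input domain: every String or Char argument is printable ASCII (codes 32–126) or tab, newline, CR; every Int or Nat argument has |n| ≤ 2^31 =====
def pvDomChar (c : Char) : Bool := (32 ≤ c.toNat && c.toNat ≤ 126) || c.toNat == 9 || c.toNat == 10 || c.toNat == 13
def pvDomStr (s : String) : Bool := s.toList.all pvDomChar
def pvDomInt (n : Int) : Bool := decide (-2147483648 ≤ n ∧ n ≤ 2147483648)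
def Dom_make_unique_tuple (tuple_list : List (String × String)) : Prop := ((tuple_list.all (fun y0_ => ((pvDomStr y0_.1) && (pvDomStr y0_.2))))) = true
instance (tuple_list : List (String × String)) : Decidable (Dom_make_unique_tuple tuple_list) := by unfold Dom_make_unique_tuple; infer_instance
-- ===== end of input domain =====

-- B replaces A's dict accumulation by a dict-free peel loop (take first remaining id, count and remove its occurrences per round); objective: alternative algorithm, similar cost.


-- ===== PORT A =====
-- one fused loop: dict id ↦ (publisher, count); the in-branch reads count_dict[id] (key present, so getD is exact)
def pvStepA (d : PySem.Dict String (String × Int)) (p : String × String) : PySem.Dict String (String × Int) :=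
  if d.contains p.1 then
    let cur := d.getD p.1 ("", 0)
    d.insert p.1 (cur.1, cur.2 + 1)
  else
    d.insert p.1 (p.2, 1)

def make_unique_tuple (tuple_list : List (String × String)) : List (String × String × Int) :=
  let count_dict := tuple_list.foldl pvStepA PySem.Dict.empty
  count_dict.items.map (fun kv => (kv.1, kv.2.1, kv.2.2))

-- ===== PORT B =====
-- the while loop of Source B: peel the first remaining id, counting its occurrences (n) and
-- keeping the others (remaining) in one scan over rest; one output row per iteration
def pvPeel : List (String × String) → List (String × String × Int)
  | [] => []
  | (id, pub) :: t =>
      (id, pub, ((((id, pub) :: t).countP (fun x => x.1 == id) : Nat) : Int)) ::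
        pvPeel (((id, pub) :: t).filter (fun x => x.1 != id))
termination_by l => l.length
decreasing_by
  simp only [List.filter_cons, bne_self_eq_false, List.length_cons]
  exact Nat.lt_succ_of_le (List.length_filter_le _ _)

def make_unique_tuple_alt (tuple_list : List (String × String)) : List (String × String × Int) :=
  pvPeel tuple_list

-- ===== PRECONDITION & SPEC =====
def Spec_make_unique_tuple (tuple_list : List (String × String)) (out : List (String × String × Int)) : Prop := out = make_unique_tuple_alt tuple_list
instance (tuple_list : List (String × String)) (out : List (String × String × Int)) : Decidable (Spec_make_unique_tuple tuple_list out) := by unfold Spec_make_unique_tuple; infer_instance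

-- ===== CLAIM (what is proved, stated in full; the proofs are below) =====
def Claim_equal_make_unique_tuple : Prop := ∀ (tuple_list : List (String × String)), Dom_make_unique_tuple tuple_list → Spec_make_unique_tuple tuple_list (make_unique_tuple tuple_list)

-- ===== LEMMAS AND PROOFS =====

-- proof-internal reference: the first-seen (id, publisher) pairs of t whose id is not in seen
def pvFirsts (seen : List String) : List (String × String) → List (String × String)
  | [] => []
  | (i, p) :: t => if i ∈ seen then pvFirsts seen t else (i, p) :: pvFirsts (i :: seen) t

theorem pvFirsts_not_seen (seen : List String) (t : List (String × String)) :
    ∀ ip ∈ pvFirsts seen t, ip.1 ∉ seen := by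
  induction t generalizing seen with
  | nil => simp [pvFirsts]
  | cons q t ih =>
    obtain ⟨i, p⟩ := q
    intro ip hip
    by_cases h : i ∈ seen
    · exact ih seen ip (by simpa [pvFirsts, h] using hip)
    · simp only [pvFirsts, if_neg h, List.mem_cons] at hip
      rcases hip with h1 | hip
      · rw [h1]; exact h
      · exact fun hs => ih (i :: seen) ip hip (List.mem_cons_of_mem _ hs)

theorem pvFirsts_congr (s1 s2 : List String) (t : List (String × String))
    (h : ∀ x, x ∈ s1 ↔ x ∈ s2) : pvFirsts s1 t = pvFirsts s2 t := by
  induction t generalizing s1 s2 with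
  | nil => rfl
  | cons q t ih =>
    obtain ⟨i, p⟩ := q
    by_cases hm : i ∈ s1
    · simp only [pvFirsts, if_pos hm, if_pos ((h i).1 hm)]
      exact ih s1 s2 h
    · simp only [pvFirsts, if_neg hm, if_neg (fun hx => hm ((h i).2 hx))]
      exact congrArg _ (ih (i :: s1) (i :: s2) (by intro x; simp [h x]))

-- the setdefault fold (used only as a proof-internal description of first-seen order) appends pvFirsts
theorem pv_setdefault_items (t : List (String × String)) (dF : PySem.Dict String String) :
    (t.foldl (fun d p => d.setdefault p.1 p.2) dF).items = dF.items ++ pvFirsts dF.keys t := by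
  induction t generalizing dF with
  | nil => simp [pvFirsts]
  | cons q t ih =>
    obtain ⟨i, p⟩ := q
    by_cases hc : dF.contains i = true
    · have hm : i ∈ dF.keys := (PySem.Dict.contains_iff_mem_keys dF i).1 hc
      simp only [List.foldl_cons, PySem.Dict.setdefault_of_contains dF p hc, pvFirsts, if_pos hm]
      exact ih dF
    · have hc' : dF.contains i = false := by simpa using hc
      have hm : i ∉ dF.keys := fun h => by
        rw [(PySem.Dict.contains_iff_mem_keys dF i).2 h] at hc'; exact Bool.true_eq_false.mp hc'
      simp only [List.foldl_cons, PySem.Dict.setdefault_of_not_contains dF p hc', pvFirsts,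
        if_neg hm]
      rw [ih (dF.insert i p), PySem.Dict.items_insert_of_not_contains dF _ hc',
        PySem.Dict.keys_insert_of_not_contains dF p hc',
        pvFirsts_congr (dF.keys ++ [i]) (i :: dF.keys) t (by intro x; simp [or_comm]),
        List.append_assoc]
      rfl

-- Invariant relating A's fused dict to the first-seen dict and a running count function.
theorem pv_fold_invariant (tl : List (String × String))
    (dA : PySem.Dict String (String × Int)) (dF : PySem.Dict String String)
    (cnt : String → Int)
    (hF : dF.keys.Nodup)
    (hitems : dA.items = dF.items.map (fun kp => (kp.1, (kp.2, cnt kp.1))))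
    (hfresh : ∀ k, dF.contains k = false → cnt k = 0) :
    (tl.foldl pvStepA dA).items
      = (tl.foldl (fun d p => d.setdefault p.1 p.2) dF).items.map
          (fun kp => (kp.1, (kp.2, cnt kp.1 + ((tl.map (·.1)).count kp.1)))) := by
  induction tl generalizing dA dF cnt with
  | nil => simpa using hitems
  | cons p tl ih =>
    have keysEq : dA.keys = dF.keys := by
      simp only [PySem.Dict.keys, hitems, List.map_map]
      rfl
    have hAnd : dA.keys.Nodup := keysEq ▸ hF
    have hcontEq : dA.contains p.1 = dF.contains p.1 := by
      by_cases hm : p.1 ∈ dF.keys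
      · rw [(PySem.Dict.contains_iff_mem_keys dA p.1).2 (keysEq ▸ hm),
          (PySem.Dict.contains_iff_mem_keys dF p.1).2 hm]
      · have h1 : dA.contains p.1 ≠ true := fun h => hm (keysEq ▸ (PySem.Dict.contains_iff_mem_keys dA p.1).1 h)
        have h2 : dF.contains p.1 ≠ true := fun h => hm ((PySem.Dict.contains_iff_mem_keys dF p.1).1 h)
        simp at h1 h2; rw [h1, h2]
    simp only [List.foldl_cons, List.map_cons]
    by_cases hc : dF.contains p.1 = true
    · -- id already present: A bumps the count in place, B's setdefault is a no-op
      have hcA : dA.contains p.1 = true := hcontEq ▸ hc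
      -- first-seen publisher for p.1
      obtain ⟨kp0, hkp0, hk0⟩ : ∃ q ∈ dF.items, q.1 = p.1 := by
        have := (PySem.Dict.contains_iff_mem_keys dF p.1).1 hc
        simp only [PySem.Dict.keys, List.mem_map] at this
        obtain ⟨q, hq, hq1⟩ := this
        exact ⟨q, hq, hq1⟩
      obtain ⟨pub0⟩ : ∃ pub0, (p.1, pub0) ∈ dF.items := ⟨kp0.2, by rw [← hk0]; exact hkp0⟩
      rename_i hpub0
      have hmemA : (p.1, (pub0, cnt p.1)) ∈ dA.items := by
        rw [hitems]
        exact List.mem_map.2 ⟨(p.1, pub0), hpub0, rfl⟩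
      have hget : dA.getD p.1 ("", 0) = (pub0, cnt p.1) :=
        PySem.Dict.getD_of_mem_items dA hmemA hAnd ("", 0)
      rw [PySem.Dict.setdefault_of_contains dF p.2 hc]
      have hstep : pvStepA dA p = dA.insert p.1 (pub0, cnt p.1 + 1) := by
        simp [pvStepA, hcA, hget]
      rw [hstep,
        ih (dA.insert p.1 (pub0, cnt p.1 + 1)) dF
          (fun k => if k = p.1 then cnt k + 1 else cnt k) hF ?_ ?_]
      · apply List.map_congr_left
        intro kp _
        by_cases hk : kp.1 = p.1
        · simp [hk, add_assoc, add_comm]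
        · have hk' : p.1 ≠ kp.1 := fun h => hk h.symm
          simp [hk, hk']
      · rw [PySem.Dict.items_insert_of_contains dA _ hcA, hitems, List.map_map]
        apply List.map_congr_left
        intro kp hkp
        by_cases hk : kp.1 = p.1
        · have : kp.2 = pub0 := by
            have h1 : dF.get? kp.1 = some kp.2 :=
              PySem.Dict.get?_of_mem_items dF (by exact (Prod.mk.eta ▸ hkp)) hF
            have h2 : dF.get? p.1 = some pub0 := PySem.Dict.get?_of_mem_items dF hpub0 hF
            rw [hk] at h1; rw [h1] at h2; exact Option.some_inj.mp h2
          simp [Function.comp, hk, this]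
        · simp [Function.comp, hk]
      · intro k hknot
        have hk : k ≠ p.1 := by
          intro h; rw [h] at hknot; rw [hknot] at hc; exact Bool.false_ne_true hc
        simp [hk, hfresh k hknot]
    · -- fresh id: both dicts append
      have hc' : dF.contains p.1 = false := by simpa using hc
      have hcA : dA.contains p.1 = false := by rw [hcontEq]; exact hc'
      have hstep : pvStepA dA p = dA.insert p.1 (p.2, 1) := by
        simp [pvStepA, hcA]
      rw [hstep, PySem.Dict.setdefault_of_not_contains dF p.2 hc',
        ih (dA.insert p.1 (p.2, 1)) (dF.insert p.1 p.2)
          (fun k => if k = p.1 then cnt k + 1 else cnt k)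
          (PySem.Dict.nodup_keys_insert dF p.1 p.2 hF) ?_ ?_]
      · apply List.map_congr_left
        intro kp _
        by_cases hk : kp.1 = p.1
        · simp [hk, add_assoc, add_comm]
        · have hk' : p.1 ≠ kp.1 := fun h => hk h.symm
          simp [hk, hk']
      · rw [PySem.Dict.items_insert_of_not_contains dA _ hcA,
          PySem.Dict.items_insert_of_not_contains dF _ hc', hitems, List.map_append]
        congr 1
        · apply List.map_congr_left
          intro kp hkp
          have hk : kp.1 ≠ p.1 := by
            intro h
            have : p.1 ∈ dF.keys := by
              simp only [PySem.Dict.keys, List.mem_map]; exact ⟨kp, hkp, h⟩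
            rw [(PySem.Dict.contains_iff_mem_keys dF p.1).2 this] at hc'
            exact Bool.true_eq_false ▸ hc'.symm ▸ rfl
          simp [hk]
        · simp [hfresh p.1 hc']
      · intro k hknot
        rw [PySem.Dict.contains_insert dF p.1 k p.2] at hknot
        have h1 : (k == p.1) = false := by
          cases h : (k == p.1) <;> simp [h] at hknot ⊢
        have hk : k ≠ p.1 := by simpa using h1
        have h2 : dF.contains k = false := by simp [h1] at hknot; exact hknot
        simp [hk, hfresh k h2]

-- filtering out id does not change counts of other ids
theorem pv_countP_filter (t : List (String × String)) (i x : String) (hx : x ≠ i) :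
    (t.filter (fun a => a.1 != i)).countP (fun a => a.1 == x)
      = t.countP (fun a => a.1 == x) := by
  rw [List.countP_filter]
  apply List.countP_congr
  intro a _
  by_cases h : a.1 = x
  · simp [h, hx]
  · simp [h]

-- marking id as seen = filtering its occurrences away
theorem pvFirsts_filter (t : List (String × String)) (i : String) (seen : List String) :
    pvFirsts (i :: seen) t = pvFirsts seen (t.filter (fun a => a.1 != i)) := by
  induction t generalizing seen with
  | nil => rfl
  | cons q t ih =>
    obtain ⟨j, p⟩ := q
    by_cases hji : j = i
    · subst hji
      simp only [List.filter_cons, bne_self_eq_false, pvFirsts, List.mem_cons, true_or, if_pos]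
      exact ih seen
    · have hbne : (j != i) = true := by simpa using hji
      simp only [List.filter_cons, hbne, if_pos]
      by_cases hm : j ∈ seen
      · simp only [pvFirsts, List.mem_cons, if_pos (Or.inr hm), if_pos hm]
        exact ih seen
      · have hm' : j ∉ i :: seen := by simp [hji, hm]
        simp only [pvFirsts, if_neg hm', if_neg hm]
        refine congrArg _ ?_
        rw [pvFirsts_congr (j :: i :: seen) (i :: j :: seen) t (by intro x; simp; tauto)]
        exact ih (j :: seen)

-- pvPeel computes exactly the first-seen pairs with total counts
theorem pvPeel_eq_firsts (t : List (String × String)) :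
    pvPeel t = (pvFirsts [] t).map
      (fun ip => (ip.1, ip.2, ((t.countP (fun a => a.1 == ip.1) : Nat) : Int))) := by
  induction t using pvPeel.induct with
  | case1 => simp [pvPeel, pvFirsts]
  | case2 i p t ih =>
    have hnm : i ∉ ([] : List String) := List.not_mem_nil
    rw [pvPeel]
    simp only [pvFirsts, if_neg hnm, List.map_cons]
    refine congrArg _ ?_
    have hf : ((i, p) :: t).filter (fun a => a.1 != i) = t.filter (fun a => a.1 != i) := by
      simp
    rw [hf] at ih ⊢
    rw [ih, ← pvFirsts_filter t i []]
    apply List.map_congr_left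
    intro ip hip
    have hx : ip.1 ≠ i := by
      have := pvFirsts_not_seen [i] t ip hip
      simpa using this
    have hcons : ((i, p) :: t).countP (fun a => a.1 == ip.1) = t.countP (fun a => a.1 == ip.1) := by
      simp [Ne.symm hx]
    rw [pv_countP_filter t i ip.1 hx, hcons]

-- ===== VERDICT (by name: the statement is the Claim_ definition above) =====
theorem make_unique_tuple_spec : Claim_equal_make_unique_tuple := by
  intro tl _
  unfold Spec_make_unique_tuple
  simp only [make_unique_tuple, make_unique_tuple_alt]
  rw [pv_fold_invariant tl PySem.Dict.empty PySem.Dict.empty (fun _ => 0)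
      (by simp [PySem.Dict.keys_empty]) (by rfl) (by simp),
    pv_setdefault_items tl PySem.Dict.empty, pvPeel_eq_firsts tl]
  have hkeys : (PySem.Dict.empty : PySem.Dict String String).keys = [] := by
    simp [PySem.Dict.keys_empty]
  have hitems : (PySem.Dict.empty : PySem.Dict String String).items = [] := by rfl
  rw [hitems, hkeys, List.nil_append, List.map_map]
  apply List.map_congr_left
  intro ip _
  have : (tl.map (·.1)).count ip.1 = tl.countP (fun a => a.1 == ip.1) := by
    rw [List.count_eq_countP, List.countP_map]; rfl
  simp [this]
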